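-- pv_equiv track=rewrite | github.com/dcxSt/project-euler | continued_fractions.py | get_hi_ki
-- ===== SOURCE A (Python) =====
-- def gcd(a:int,b:int):
--     # takes two ints, returns their greatest common divisor
--     if a > b:
--         r = a % b
--         if r == 0:
--             return b
--         return gcd(b,r)
--     elif a < b:
--         r = b % a
--         if r == 0:
--             return a
--         return gcd(a,r)
--     return a # this is when a = b
--
-- def get_hi_ki(cfrac):
--     # takes a continued fraction sequence and obtains the numerator hi and denominator ki
--     cf = cfrac.copy() # [i for i in cfrac]
--     hi , ki = 1 , cf[-1]
--     cf = cf[:-1]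
--     for a in cf[::-1]:
--         hi , ki = ki , hi + a * ki
--     hi,ki = ki,hi # flip them once
--     g = gcd(hi,ki)
--     return hi//g , ki//g # the // operator is there just to keep them as ints
-- ===== SOURCE B (Python) =====
-- def _gcd(a, b):
--     while b:
--         a, b = b, a % b
--     return a
--
-- def get_hi_ki(cfrac):
--     # forward convergent recurrence h_n = a_n*h_{n-1} + h_{n-2}, k likewise
--     h, hp = 1, 0
--     k, kp = 0, 1
--     for a in cfrac:
--         h, hp = a * h + hp, h
--         k, kp = a * k + kp, k
--     g = _gcd(h, k)
--     return h // g, k // g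
-- ===== Notes on version B (the rewrite author's own statement) =====
-- stated objective: idiomatic
-- what changed: B replaces A's copy/slice/reverse backward loop plus final swap with the standard forward convergent recurrence h=a*h'+h'', k=a*k'+k'' over cfrac front-to-back, and reduces with an iterative Euclid gcd instead of A's three-branch recursive gcd; B does not build any intermediate lists.
-- outside the precondition, e.g. on get_hi_ki([-1, 2]): A returns (1, -2), B returns (-1, 2); on get_hi_ki([2, 0]): A raises ZeroDivisionError, B returns (1, 0)
import Mathlib
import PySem

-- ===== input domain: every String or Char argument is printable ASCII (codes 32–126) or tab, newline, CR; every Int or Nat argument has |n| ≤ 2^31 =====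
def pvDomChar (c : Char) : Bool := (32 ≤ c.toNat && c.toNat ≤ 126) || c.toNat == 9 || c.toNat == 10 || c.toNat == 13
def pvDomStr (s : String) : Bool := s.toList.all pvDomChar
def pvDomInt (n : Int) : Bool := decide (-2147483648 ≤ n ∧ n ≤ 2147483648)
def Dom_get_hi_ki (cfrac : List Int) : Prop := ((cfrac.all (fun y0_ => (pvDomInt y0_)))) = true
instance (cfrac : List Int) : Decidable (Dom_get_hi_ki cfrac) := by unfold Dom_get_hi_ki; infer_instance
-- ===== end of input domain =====

-- B evaluates the continued fraction with the standard forward convergent recurrence instead of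
-- A's copy/slice/reverse backward loop, and reduces with an iterative Euclid gcd (idiomatic, no
-- intermediate lists); return-value equivalence is proved on nonneg-term inputs with nonzero last term.

-- ===== PORT A =====
-- A's recursive gcd; the Nat fuel only makes the recursion total in Lean (ample on every admitted input)
def pvGcdA : Nat → Int → Int → Int
  | 0, a, _ => a
  | fuel+1, a, b =>
    if a > b then
      let r := PySem.Int.mod a b
      if r = 0 then b else pvGcdA fuel b r
    else if a < b then
      let r := PySem.Int.mod b a
      if r = 0 then a else pvGcdA fuel a r
    else a

def get_hi_ki (cfrac : List Int) : Int × Int :=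
  let cf := cfrac                                   -- cf = cfrac.copy()
  match PySem.List.pyGet? cf (-1) with              -- cf[-1]; none = IndexError, excluded by Pre_
  | none => (0, 0)
  | some last =>
    let cf2 := PySem.List.slice cf none (some (-1)) -- cf = cf[:-1]
    let rev := (PySem.List.slice? cf2 none none (-1)).getD []  -- cf[::-1]; step -1 ≠ 0, never none
    let p := rev.foldl (fun (s : Int × Int) a => (s.2, s.1 + a * s.2)) (1, last)
    let hi := p.2                                   -- hi,ki = ki,hi — the final flip
    let ki := p.1
    let g := pvGcdA (hi.natAbs + ki.natAbs + 1) hi ki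
    (PySem.Int.floordiv hi g, PySem.Int.floordiv ki g)

-- ===== PORT B =====
-- B's iterative Euclid gcd; the Nat fuel only makes the loop total in Lean (b.natAbs+1 always suffices)
def pvGcdB : Nat → Int → Int → Int
  | 0, a, _ => a
  | fuel+1, a, b => if b ≠ 0 then pvGcdB fuel b (PySem.Int.mod a b) else a

def get_hi_ki_alt (cfrac : List Int) : Int × Int :=
  let s := cfrac.foldl
    (fun (s : Int × Int × Int × Int) a => (a * s.1 + s.2.1, s.1, a * s.2.2.1 + s.2.2.2, s.2.2.1))
    (1, 0, 0, 1)                                   -- (h, hp, k, kp)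
  let h := s.1
  let k := s.2.2.1
  let g := pvGcdB (k.natAbs + 1) h k
  (PySem.Int.floordiv h g, PySem.Int.floordiv k g)

-- ===== PRECONDITION & SPEC =====
-- Pre_ is the natural continued-fraction domain: a nonempty sequence of nonnegative terms whose
-- last term is nonzero.  It excludes (a) inputs on which A raises — the empty list (IndexError)
-- and nonneg lists ending in 0 (gcd hits 0, ZeroDivisionError) — and (b) lists with negative
-- terms, on which A's hand-rolled gcd usually raises ZeroDivisionError/RecursionError and, where
-- it does return, may yield an accidental sign/normalisation of the reduced pair.
def Pre_get_hi_ki (cfrac : List Int) : Prop :=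
  cfrac ≠ [] ∧ (∀ x ∈ cfrac, 0 ≤ x) ∧ cfrac.getLast? ≠ some 0
instance (cfrac : List Int) : Decidable (Pre_get_hi_ki cfrac) := by unfold Pre_get_hi_ki; infer_instance

def pvWitness_get_hi_ki : List Int := [2, 3, 4]

def Spec_get_hi_ki (cfrac : List Int) (out : Int × Int) : Prop := out = get_hi_ki_alt cfrac
instance (cfrac : List Int) (out : Int × Int) : Decidable (Spec_get_hi_ki cfrac out) := by unfold Spec_get_hi_ki; infer_instance

-- ===== CLAIM (what is proved, stated in full; the proofs are below) =====
def Claim_equal_get_hi_ki : Prop := ∀ (cfrac : List Int), Dom_get_hi_ki cfrac → Pre_get_hi_ki cfrac → Spec_get_hi_ki cfrac (get_hi_ki cfrac)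

-- ===== LEMMAS AND PROOFS =====

-- B's fold step and 2×2 matrix product on (h, hp, k, kp) states
def pvStep (s : Int × Int × Int × Int) (a : Int) : Int × Int × Int × Int :=
  (a * s.1 + s.2.1, s.1, a * s.2.2.1 + s.2.2.2, s.2.2.1)

def pvMul (s t : Int × Int × Int × Int) : Int × Int × Int × Int :=
  (s.1 * t.1 + s.2.1 * t.2.2.1, s.1 * t.2.1 + s.2.1 * t.2.2.2,
   s.2.2.1 * t.1 + s.2.2.2 * t.2.2.1, s.2.2.1 * t.2.1 + s.2.2.2 * t.2.2.2)

def pvP (l : List Int) : Int × Int × Int × Int := l.foldl pvStep (1, 0, 0, 1)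

theorem pvFoldl_eq_mul (l : List Int) : ∀ s : Int × Int × Int × Int,
    l.foldl pvStep s = pvMul s (pvP l) := by
  induction l with
  | nil =>
    intro s; obtain ⟨a, b, c, d⟩ := s
    simp [pvP, pvMul]
  | cons x l ih =>
    intro s
    show List.foldl pvStep (pvStep s x) l = pvMul s (List.foldl pvStep (pvStep (1,0,0,1) x) l)
    rw [ih (pvStep s x), ih (pvStep (1,0,0,1) x)]
    rcases hP : pvP l with ⟨p, q, r, t⟩
    obtain ⟨a, b, c, d⟩ := s
    simp only [pvStep, pvMul]
    refine Prod.ext (by ring) (Prod.ext (by ring) (Prod.ext (by ring) (by ring)))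

-- the component form of the convergent recurrence: pvP (a :: l) from pvP l
theorem pvP_cons (a : Int) (l : List Int) :
    pvP (a :: l) = (a * (pvP l).1 + (pvP l).2.2.1, a * (pvP l).2.1 + (pvP l).2.2.2,
                    (pvP l).1, (pvP l).2.1) := by
  show List.foldl pvStep (pvStep (1,0,0,1) a) l = _
  rw [pvFoldl_eq_mul]
  rcases hP : pvP l with ⟨p, q, r, t⟩
  simp only [pvStep, pvMul]
  refine Prod.ext (by ring) (Prod.ext (by ring) (Prod.ext (by ring) (by ring)))

-- A's backward loop (over dropLast.reverse, seeded with the last term), after the final flip,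
-- yields exactly (k, h) = ((pvP l).2.2.1, (pvP l).1)
theorem pvA_loop (l : List Int) : ∀ last : Int, l.getLast? = some last →
    l.dropLast.reverse.foldl (fun (s : Int × Int) a => (s.2, s.1 + a * s.2)) (1, last)
      = ((pvP l).2.2.1, (pvP l).1) := by
  induction l with
  | nil => intro last h; simp at h
  | cons x l ih =>
    intro last h
    cases l with
    | nil =>
      simp at h
      subst h
      simp [pvP, pvStep]
    | cons y m =>
      rw [List.getLast?_cons_cons] at h
      rw [List.dropLast_cons_of_ne_nil (by simp), List.reverse_cons, List.foldl_append,
          ih last h, pvP_cons x (y :: m)]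
      simp only [List.foldl_cons, List.foldl_nil]
      refine Prod.ext (by simp) (by simp; ring)

theorem pvP_pos (l : List Int) : ∀ last : Int, l.getLast? = some last → 0 < last →
    (∀ x ∈ l, 0 ≤ x) → 1 ≤ (pvP l).1 ∧ 1 ≤ (pvP l).2.2.1 := by
  induction l with
  | nil => intro last h; simp at h
  | cons x l ih =>
    intro last h hpos hnn
    cases l with
    | nil =>
      simp at h
      subst h
      simp [pvP, pvStep]
      omega
    | cons y m =>
      rw [List.getLast?_cons_cons] at h
      have hx : 0 ≤ x := hnn x (by simp)
      have hHK := ih last h hpos (fun z hz => hnn z (by simp [hz]))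
      have hmul : 0 ≤ x * (pvP (y :: m)).1 := mul_nonneg hx (by omega)
      rw [pvP_cons x (y :: m)]
      constructor
      · show 1 ≤ x * (pvP (y :: m)).1 + (pvP (y :: m)).2.2.1
        omega
      · show 1 ≤ (pvP (y :: m)).1
        omega

theorem pvGcd_step (a b : Int) (hb : 0 < b) :
    Int.gcd b (PySem.Int.mod a b) = Int.gcd a b := by
  rw [PySem.Int.mod_eq_emod_of_pos hb, Int.emod_def, Int.gcd_comm a b]
  exact Int.gcd_sub_mul_left_right b a (a / b)

theorem pvGcdB_eq : ∀ (f : Nat) (a b : Int), 0 < a → 0 ≤ b → b.natAbs < f →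
    pvGcdB f a b = Int.gcd a b := by
  intro f
  induction f with
  | zero => intro a b _ _ h; omega
  | succ f ih =>
    intro a b ha hb hf
    by_cases h0 : b = 0
    · subst h0
      simp [pvGcdB, Int.natAbs_of_nonneg ha.le]
    · have hbpos : 0 < b := lt_of_le_of_ne hb (Ne.symm h0)
      have hmn : 0 ≤ PySem.Int.mod a b := PySem.Int.mod_nonneg a hbpos
      have hml : PySem.Int.mod a b < b := PySem.Int.mod_lt a hbpos
      rw [show pvGcdB (f+1) a b = pvGcdB f b (PySem.Int.mod a b) by simp [pvGcdB, h0]]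
      rw [ih b (PySem.Int.mod a b) hbpos hmn (by omega)]
      exact congrArg _ (pvGcd_step a b hbpos)

theorem pvGcdA_eq : ∀ (f : Nat) (a b : Int), 0 < a → 0 < b → a.natAbs + b.natAbs ≤ f →
    pvGcdA f a b = Int.gcd a b := by
  intro f
  induction f with
  | zero => intro a b ha hb h; omega
  | succ f ih =>
    intro a b ha hb hf
    by_cases hab : a > b
    · have hr0 : 0 ≤ PySem.Int.mod a b := PySem.Int.mod_nonneg a hb
      have hrb : PySem.Int.mod a b < b := PySem.Int.mod_lt a hb
      by_cases hz : PySem.Int.mod a b = 0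
      · have hdvd : b ∣ a := (PySem.Int.mod_eq_zero_iff_dvd a b).mp hz
        rw [show pvGcdA (f+1) a b = b by simp [pvGcdA, hab, hz]]
        rw [Int.gcd_eq_natAbs_right_iff_dvd.mpr hdvd, Int.natAbs_of_nonneg hb.le]
      · have hrpos : 0 < PySem.Int.mod a b := lt_of_le_of_ne hr0 (Ne.symm hz)
        rw [show pvGcdA (f+1) a b = pvGcdA f b (PySem.Int.mod a b) by simp [pvGcdA, hab, hz]]
        rw [ih b (PySem.Int.mod a b) hb hrpos (by omega)]
        exact congrArg _ (pvGcd_step a b hb)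
    · by_cases hba : a < b
      · have hr0 : 0 ≤ PySem.Int.mod b a := PySem.Int.mod_nonneg b ha
        have hra : PySem.Int.mod b a < a := PySem.Int.mod_lt b ha
        by_cases hz : PySem.Int.mod b a = 0
        · have hdvd : a ∣ b := (PySem.Int.mod_eq_zero_iff_dvd b a).mp hz
          rw [show pvGcdA (f+1) a b = a by simp [pvGcdA, hab, hba, hz]]
          rw [Int.gcd_eq_natAbs_left_iff_dvd.mpr hdvd, Int.natAbs_of_nonneg ha.le]
        · have hrpos : 0 < PySem.Int.mod b a := lt_of_le_of_ne hr0 (Ne.symm hz)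
          rw [show pvGcdA (f+1) a b = pvGcdA f a (PySem.Int.mod b a) by simp [pvGcdA, hab, hba, hz]]
          rw [ih a (PySem.Int.mod b a) ha hrpos (by omega)]
          rw [pvGcd_step b a ha, Int.gcd_comm b a]
      · have : a = b := le_antisymm (not_lt.mp hab) (not_lt.mp hba)
        subst this
        rw [show pvGcdA (f+1) a a = a by simp [pvGcdA]]
        rw [Int.gcd_self, Int.natAbs_of_nonneg ha.le]

-- ===== VERDICT (by name: the statement is the Claim_ definition above) =====
theorem get_hi_ki_spec : Claim_equal_get_hi_ki := by
  intro cfrac _ hpre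
  obtain ⟨hne, hnn, hlast⟩ := hpre
  obtain ⟨last, hgl⟩ : ∃ last, cfrac.getLast? = some last := by
    cases h : cfrac.getLast? with
    | none => exact absurd (List.getLast?_eq_none_iff.mp h) hne
    | some y => exact ⟨y, rfl⟩
  have hlpos : 0 < last := by
    have hmem : last ∈ cfrac := List.mem_of_getLast? hgl
    have h1 := hnn last hmem
    have h2 : last ≠ 0 := fun h => hlast (h ▸ hgl)
    omega
  have hHK := pvP_pos cfrac last hgl hlpos hnn
  have hB : List.foldl (fun (s : Int × Int × Int × Int) a =>
      (a * s.1 + s.2.1, s.1, a * s.2.2.1 + s.2.2.2, s.2.2.1)) (1, 0, 0, 1) cfrac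
      = pvP cfrac := rfl
  unfold Spec_get_hi_ki get_hi_ki get_hi_ki_alt
  simp only [PySem.List.pyGet?_neg_one, hgl, PySem.List.slice_to_neg_one,
    PySem.List.slice?_none_none_neg_one, Option.getD_some, hB,
    pvA_loop cfrac last hgl]
  rw [pvGcdA_eq _ _ _ (by omega) (by omega) (by omega),
      pvGcdB_eq _ _ _ (by omega) (by omega) (by omega)]
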